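-- pv_equiv track=rewrite | github.com/IamChidera/Python1 | merge_tables.py | merge_tables
-- ===== SOURCE A (Python) =====
-- class DisjointSetUnion:
--     def __init__(self, n):
--         self.parent = [i for i in range(n)]
--         self.rank = [0] * n
--         self.size = [1] * n
--         self.max_size = max(self.size)
--
--     def find(self, x):
--         if self.parent[x] != x:
--             self.parent[x] = self.find(self.parent[x])
--         return self.parent[x]
--
--     def union(self, x, y):
--         root_x = self.find(x)
--         root_y = self.find(y)
--
--         if root_x == root_y:
--             return
--
--         if self.rank[root_x] < self.rank[root_y]:
--             root_x, root_y = root_y, root_x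
--
--         self.parent[root_y] = root_x
--         self.size[root_x] += self.size[root_y]
--         self.max_size = max(self.max_size, self.size[root_x])
--
--     def get_max_size(self):
--         return self.max_size
--
-- def merge_tables(n, m, rows, queries):
--     dsu = DisjointSetUnion(n)
--     result = []
--
--     for d, s in queries:
--         d, s = d - 1, s - 1  # Convert 1-based indexing to 0-based indexing
--         dsu.union(d, s)
--         result.append(dsu.get_max_size())
--
--     return result
-- ===== SOURCE B (Python) =====
-- def merge_tables(n, m, rows, queries):
--     # Flat labelling instead of a parent forest: label[i] names i's component;
--     # merging rewrites every label of one side, size is recounted directly.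
--     label = list(range(n))
--     cur = 1
--     res = []
--     for d, s in queries:
--         a, b = label[d - 1], label[s - 1]
--         if a != b:
--             label = [a if x == b else x for x in label]
--             cur = max(cur, label.count(a))
--         res.append(cur)
--     return res
-- ===== Notes on version B (the rewrite author's own statement) =====
-- stated objective: simpler
-- what changed: Replaces the union-find forest (recursive find with path compression, rank, per-root size array, running max field) by a flat label array: a merge rewrites the labels of one component and recounts its size, so there is no find recursion and no auxiliary arrays.
import Mathlib
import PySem

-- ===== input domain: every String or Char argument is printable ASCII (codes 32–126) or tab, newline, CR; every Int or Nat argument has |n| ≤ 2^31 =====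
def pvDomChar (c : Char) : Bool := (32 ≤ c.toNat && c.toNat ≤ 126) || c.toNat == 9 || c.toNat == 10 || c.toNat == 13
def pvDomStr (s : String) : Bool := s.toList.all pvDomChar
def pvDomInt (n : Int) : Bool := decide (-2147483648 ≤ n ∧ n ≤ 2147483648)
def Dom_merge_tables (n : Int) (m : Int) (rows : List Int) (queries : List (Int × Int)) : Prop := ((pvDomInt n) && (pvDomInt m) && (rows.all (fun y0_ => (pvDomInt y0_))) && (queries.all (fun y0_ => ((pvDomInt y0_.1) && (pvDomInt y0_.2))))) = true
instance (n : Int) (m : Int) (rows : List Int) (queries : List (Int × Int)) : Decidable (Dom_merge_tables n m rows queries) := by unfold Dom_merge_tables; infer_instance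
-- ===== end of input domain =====

-- B replaces A's union-find forest (recursive find with path compression, rank and size
-- arrays, running max field) by a flat label array: a merge rewrites the labels of one
-- component and recounts its size directly (objective: simpler; not faster).

-- ===== PORT A =====
-- DisjointSetUnion.find: recursive with path compression.  Python's recursion has no
-- fuel; the fuel `parent.length + 1` is an upper bound on the recursion depth for every
-- state reachable on inputs admitted by Pre_ (chain nodes are distinct), so the port is
-- exact there; the fuel-0 fallback is unreachable under Pre_.
def pvFind (fuel : Nat) (parent : List Int) (x : Int) : List Int × Int :=
  match fuel with
  | 0 => (parent, x)
  | fuel + 1 =>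
    let px := PySem.List.pyGetD parent x 0      -- self.parent[x] (negative index wraps; out of range = IndexError, excluded by Pre_)
    if px ≠ x then
      let r := pvFind fuel parent px            -- self.find(self.parent[x])
      (PySem.List.pySetD r.1 x r.2, r.2)        -- self.parent[x] = …; return self.parent[x]
    else (parent, x)

-- DisjointSetUnion.union on the state (parent, rank, size, max_size)
def pvUnionA (st : List Int × List Int × List Int × Int) (x y : Int) :
    List Int × List Int × List Int × Int :=
  let p := st.1
  let rank := st.2.1
  let size := st.2.2.1
  let maxsz := st.2.2.2
  let f1 := pvFind (p.length + 1) p x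
  let rootx := f1.2
  let f2 := pvFind (f1.1.length + 1) f1.1 y
  let p2 := f2.1
  let rooty := f2.2
  if rootx = rooty then (p2, rank, size, maxsz)
  else
    let pr := if PySem.List.pyGetD rank rootx 0 < PySem.List.pyGetD rank rooty 0
              then (rooty, rootx) else (rootx, rooty)
    let rx := pr.1
    let ry := pr.2
    let p3 := PySem.List.pySetD p2 ry rx
    let size' := PySem.List.pySetD size rx
        (PySem.List.pyGetD size rx 0 + PySem.List.pyGetD size ry 0)
    (p3, rank, size', max maxsz (PySem.List.pyGetD size' rx 0))

def merge_tables (n : Int) (m : Int) (rows : List Int) (queries : List (Int × Int)) : List Int :=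
  let init : List Int × List Int × List Int × Int :=
    (PySem.List.pyRange 0 n 1,                                     -- parent = [i for i in range(n)]
     List.replicate n.toNat 0,                                     -- rank = [0] * n
     List.replicate n.toNat 1,                                     -- size = [1] * n
     (PySem.List.max? (List.replicate n.toNat (1 : Int)) (fun v => v)).getD 0)  -- max_size = max(self.size); none = ValueError on n ≤ 0, excluded by Pre_
  (queries.foldl
    (fun acc q =>
      let st := pvUnionA acc.1 (q.1 - 1) (q.2 - 1)
      (st, acc.2 ++ [st.2.2.2]))
    (init, ([] : List Int))).2

-- ===== PORT B =====
def merge_tables_alt (n : Int) (m : Int) (rows : List Int) (queries : List (Int × Int)) : List Int :=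
  (queries.foldl
    (fun st q =>
      let a := PySem.List.pyGetD st.1 (q.1 - 1) 0
      let b := PySem.List.pyGetD st.1 (q.2 - 1) 0
      if a ≠ b then
        let label' := st.1.map (fun x => if x = b then a else x)
        let cur' := max st.2.1 ((label'.count a : Nat) : Int)
        (label', cur', st.2.2 ++ [cur'])
      else (st.1, st.2.1, st.2.2 ++ [st.2.1]))
    (PySem.List.pyRange 0 n 1, (1 : Int), ([] : List Int))).2.2

-- ===== PRECONDITION & SPEC =====
-- Pre_ excludes exactly the inputs on which the Python A raises: n ≤ 0 (ValueError from
-- max([]) in __init__) and queries whose 0-based indices d-1, s-1 fall outside [-n, n)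
-- (IndexError from list indexing).
def Pre_merge_tables (n : Int) (m : Int) (rows : List Int) (queries : List (Int × Int)) : Prop :=
  1 ≤ n ∧ ∀ q ∈ queries, (-n ≤ q.1 - 1 ∧ q.1 - 1 < n) ∧ (-n ≤ q.2 - 1 ∧ q.2 - 1 < n)
instance (n : Int) (m : Int) (rows : List Int) (queries : List (Int × Int)) : Decidable (Pre_merge_tables n m rows queries) := by unfold Pre_merge_tables; infer_instance

def pvWitness_merge_tables : Int × Int × List Int × (List (Int × Int)) := (3, 0, [], [(1, 2), (2, 3)])

def Spec_merge_tables (n : Int) (m : Int) (rows : List Int) (queries : List (Int × Int)) (out : List Int) : Prop := out = merge_tables_alt n m rows queries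
instance (n : Int) (m : Int) (rows : List Int) (queries : List (Int × Int)) (out : List Int) : Decidable (Spec_merge_tables n m rows queries out) := by unfold Spec_merge_tables; infer_instance

-- ===== CLAIM (what is proved, stated in full; the proofs are below) =====
def Claim_equal_merge_tables : Prop := ∀ (n : Int) (m : Int) (rows : List Int) (queries : List (Int × Int)), Dom_merge_tables n m rows queries → Pre_merge_tables n m rows queries → Spec_merge_tables n m rows queries (merge_tables n m rows queries)

-- ===== LEMMAS AND PROOFS =====

-- Abstract view of the parent array: one pointer step, its iterates, roots.
def pstep (p : List Int) (x : Int) : Int := PySem.List.pyGetD p x 0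
def piter (p : List Int) (k : Nat) (x : Int) : Int := (pstep p)^[k] x
def pIsRoot (p : List Int) (x : Int) : Prop := pstep p x = x
def proot (p : List Int) (x : Int) : Int := piter p p.length x

-- A well-formed DSU parent array for size n: right length, entries in range,
-- every chain eventually reaches a fixed point.
def GoodP (n : Int) (p : List Int) : Prop :=
  p.length = n.toNat ∧ (∀ e ∈ p, 0 ≤ e ∧ e < n) ∧
  ∀ x, 0 ≤ x → x < n → ∃ k, pIsRoot p (piter p k x)

-- The per-query invariant tying A's state (parent, size) to B's label array:
-- same partition, and A's size at the root = B's label count.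
def InvP (n : Int) (parent size label : List Int) : Prop :=
  GoodP n parent ∧ label.length = n.toNat ∧ size.length = n.toNat ∧
  (∀ i j, 0 ≤ i → i < n → 0 ≤ j → j < n →
    (proot parent i = proot parent j ↔ PySem.List.pyGetD label i 0 = PySem.List.pyGetD label j 0)) ∧
  (∀ i, 0 ≤ i → i < n →
    PySem.List.pyGetD size (proot parent i) 0 = (label.count (PySem.List.pyGetD label i 0) : Int))

lemma piter_succ (p : List Int) (k : Nat) (x : Int) :
    piter p (k + 1) x = piter p k (pstep p x) := Function.iterate_succ_apply _ _ _

lemma piter_fixed {p : List Int} {x : Int} (h : pIsRoot p x) (k : Nat) :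
    piter p k x = x := Function.iterate_fixed h k

lemma piter_add (p : List Int) (a b : Nat) (x : Int) :
    piter p (a + b) x = piter p a (piter p b x) := by
  simp [piter, Function.iterate_add_apply]

lemma pstep_range {n : Int} {p : List Int}
    (hlen : p.length = n.toNat) (he : ∀ e ∈ p, 0 ≤ e ∧ e < n)
    {x : Int} (hx0 : 0 ≤ x) (hxn : x < n) : 0 ≤ pstep p x ∧ pstep p x < n := by
  have hn : 0 < n := lt_of_le_of_lt hx0 hxn
  have hmem : PySem.List.pyGetD p x 0 ∈ p := by
    apply PySem.List.pyGetD_mem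
    simp [PySem.Raise.InRange, hlen]
    omega
  exact he _ hmem

lemma piter_range {n : Int} {p : List Int}
    (hlen : p.length = n.toNat) (he : ∀ e ∈ p, 0 ≤ e ∧ e < n)
    {x : Int} (hx0 : 0 ≤ x) (hxn : x < n) (k : Nat) :
    0 ≤ piter p k x ∧ piter p k x < n := by
  induction k generalizing x with
  | zero => exact ⟨hx0, hxn⟩
  | succ k ih =>
    rw [piter_succ]
    have := pstep_range hlen he hx0 hxn
    exact ih this.1 this.2

lemma iter_root_unique {p : List Int} {x : Int} {a b : Nat}
    (ha : pIsRoot p (piter p a x)) (hb : pIsRoot p (piter p b x)) :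
    piter p a x = piter p b x := by
  rcases le_total a b with h | h
  · have : piter p b x = piter p (b - a + a) x := by congr 1; omega
    rw [this, piter_add, piter_fixed ha]
  · have : piter p a x = piter p (a - b + b) x := by congr 1; omega
    rw [this, piter_add, piter_fixed hb]

-- Pigeonhole: a chain that reaches a root reaches it in < length steps.
lemma reach_lt {n : Int} {p : List Int} (hg : GoodP n p)
    {x : Int} (hx0 : 0 ≤ x) (hxn : x < n) :
    ∃ k < p.length, pIsRoot p (piter p k x) := by
  obtain ⟨hlen, he, hr⟩ := hg
  obtain ⟨k, hk⟩ := hr x hx0 hxn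
  have hfind : ∃ k, pIsRoot p (piter p k x) := ⟨k, hk⟩
  classical
  let k0 := Nat.find hfind
  have hk0 : pIsRoot p (piter p k0 x) := Nat.find_spec hfind
  have hmin : ∀ j, j < k0 → ¬ pIsRoot p (piter p j x) := fun j hj => Nat.find_min hfind hj
  refine ⟨k0, ?_, hk0⟩
  by_contra hbig
  push Not at hbig
  -- k0 ≥ p.length; pigeonhole on the first length+1 chain nodes
  have hmaps : ∀ j ∈ Finset.range (p.length + 1), piter p j x ∈ Finset.Ico (0 : Int) n := by
    intro j _
    have := piter_range hlen he hx0 hxn j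
    simp only [Finset.mem_Ico]
    exact this
  have hcard : (Finset.Ico (0 : Int) n).card < (Finset.range (p.length + 1)).card := by
    simp only [Int.card_Ico, Finset.card_range]
    omega
  obtain ⟨a, ha, b, hb, hab, heq⟩ :=
    Finset.exists_ne_map_eq_of_card_lt_of_maps_to hcard hmaps
  simp [Finset.mem_range] at ha hb
  -- wlog a < b
  rcases lt_or_gt_of_ne hab with hlt | hlt
  case _ =>
    have hble : b ≤ k0 := by omega
    have : piter p (k0 - b + a) x = piter p k0 x := by
      have h1 : piter p k0 x = piter p (k0 - b + b) x := by congr 1; omega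
      rw [h1, piter_add, heq, ← piter_add]
    exact hmin (k0 - b + a) (by omega) (this ▸ hk0)
  case _ =>
    have hble : a ≤ k0 := by omega
    have : piter p (k0 - a + b) x = piter p k0 x := by
      have h1 : piter p k0 x = piter p (k0 - a + a) x := by congr 1; omega
      rw [h1, piter_add, ← heq, ← piter_add]
    exact hmin (k0 - a + b) (by omega) (this ▸ hk0)

lemma proot_isRoot {n : Int} {p : List Int} (hg : GoodP n p)
    {x : Int} (hx0 : 0 ≤ x) (hxn : x < n) : pIsRoot p (proot p x) := by
  obtain ⟨k, hk, hroot⟩ := reach_lt hg hx0 hxn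
  have h : piter p p.length x = piter p (p.length - k + k) x := by congr 1; omega
  have h2 : proot p x = piter p k x := by
    rw [proot, h, piter_add, piter_fixed hroot]
  rw [pIsRoot, h2]
  exact hroot

lemma proot_range {n : Int} {p : List Int} (hg : GoodP n p)
    {x : Int} (hx0 : 0 ≤ x) (hxn : x < n) : 0 ≤ proot p x ∧ proot p x < n :=
  piter_range hg.1 hg.2.1 hx0 hxn p.length

lemma proot_of_isRoot {p : List Int} {x : Int} (h : pIsRoot p x) : proot p x = x :=
  piter_fixed h _

lemma proot_step {n : Int} {p : List Int} (hg : GoodP n p)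
    {x : Int} (hx0 : 0 ≤ x) (hxn : x < n) : proot p (pstep p x) = proot p x := by
  have hroot := proot_isRoot hg hx0 hxn
  have h2 : proot p (pstep p x) = piter p (p.length + 1) x := by
    rw [proot, ← piter_succ]
  rw [h2, show p.length + 1 = 1 + p.length by omega, piter_add]
  exact hroot

-- membership in a List.set
lemma mem_set_cases {l : List Int} {t : Nat} {v e : Int} (h : e ∈ l.set t v) :
    e = v ∨ e ∈ l := by
  rcases List.mem_or_eq_of_mem_set h with h' | h'
  · exact Or.inr h'
  · exact Or.inl h'

lemma pstep_set {n : Int} {p : List Int} (hlen : p.length = n.toNat)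
    {i : Int} (hi0 : 0 ≤ i) (hin : i < n) (v : Int)
    {z : Int} (hz0 : 0 ≤ z) (hzn : z < n) :
    pstep (p.set i.toNat v) z = if z = i then v else pstep p z := by
  have hn : 0 < n := lt_of_le_of_lt hz0 hzn
  have hzlen : z.toNat < p.length := by omega
  have hilen : i.toNat < p.length := by omega
  have h1 : pstep (p.set i.toNat v) z = (p.set i.toNat v)[z.toNat]'(by simpa using hzlen) := by
    apply PySem.List.pyGetD_eq_getElem
    · omega
    · simp only [List.length_set]
      omega
  have h2 : pstep p z = p[z.toNat]'hzlen := by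
    apply PySem.List.pyGetD_eq_getElem
    · omega
    · omega
  rw [h1]
  by_cases hzi : z = i
  · subst hzi
    simp [List.getElem_set]
  · have hne : z.toNat ≠ i.toNat := by omega
    rw [List.getElem_set_ne (by simpa using (Ne.symm hne))]
    simp [hzi, h2]

-- Core reachability transfer for a single set.  `T` is the new root function.
-- Case 1 (path compression): set i to its own root, roots unchanged.
lemma set_compress {n : Int} {p : List Int} (hg : GoodP n p)
    {i : Int} (hi0 : 0 ≤ i) (hin : i < n) :
    GoodP n (p.set i.toNat (proot p i)) ∧
    ∀ z, 0 ≤ z → z < n → proot (p.set i.toNat (proot p i)) z = proot p z := by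
  have hlen := hg.1
  have he := hg.2.1
  set v := proot p i with hv
  set p' := p.set i.toNat v with hp'
  have hvr : pIsRoot p v := proot_isRoot hg hi0 hin
  have hvrange := proot_range hg hi0 hin
  have hlen' : p'.length = n.toNat := by simp [hp', hlen]
  have he' : ∀ e ∈ p', 0 ≤ e ∧ e < n := by
    intro e hmem
    rcases mem_set_cases hmem with h | h
    · subst h; exact hvrange
    · exact he _ h
  have hstep' : ∀ z, 0 ≤ z → z < n → pstep p' z = if z = i then v else pstep p z :=
    fun z hz0 hzn => pstep_set hlen hi0 hin v hz0 hzn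
  -- every old root stays a root of p'
  have hroots' : ∀ z, 0 ≤ z → z < n → pIsRoot p z → pIsRoot p' z := by
    intro z hz0 hzn hr
    rw [pIsRoot, hstep' z hz0 hzn]
    by_cases hzi : z = i
    · subst hzi
      have : v = z := by rw [hv, proot_of_isRoot hr]
      simp [this]
    · simp [hzi]; exact hr
  -- reach the old root in p'
  have reach : ∀ k z, 0 ≤ z → z < n → pIsRoot p (piter p k z) →
      ∃ j, piter p' j z = proot p z := by
    intro k
    induction k with
    | zero =>
      intro z hz0 hzn hr
      exact ⟨0, (proot_of_isRoot hr).symm⟩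
    | succ k ih =>
      intro z hz0 hzn hr
      by_cases hzi : z = i
      · subst hzi
        refine ⟨1, ?_⟩
        have : piter p' 1 z = pstep p' z := rfl
        rw [this, hstep' z hz0 hzn]
        simp [hv]
      · by_cases hrz : pIsRoot p z
        · exact ⟨0, (proot_of_isRoot hrz).symm⟩
        · have hsr := pstep_range hlen he hz0 hzn
          have hnext : pIsRoot p (piter p k (pstep p z)) := by
            rw [← piter_succ]; exact hr
          obtain ⟨j, hj⟩ := ih (pstep p z) hsr.1 hsr.2 hnext
          refine ⟨j + 1, ?_⟩
          rw [piter_succ, hstep' z hz0 hzn]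
          simp [hzi]
          rw [hj, proot_step hg hz0 hzn]
  have hgood' : GoodP n p' := by
    refine ⟨hlen', he', ?_⟩
    intro z hz0 hzn
    obtain ⟨k, _, hk⟩ := reach_lt hg hz0 hzn
    obtain ⟨j, hj⟩ := reach k z hz0 hzn hk
    refine ⟨j, ?_⟩
    rw [hj]
    exact hroots' _ (proot_range hg hz0 hzn).1 (proot_range hg hz0 hzn).2
      (proot_isRoot hg hz0 hzn)
  refine ⟨hgood', ?_⟩
  intro z hz0 hzn
  obtain ⟨k, _, hk⟩ := reach_lt hg hz0 hzn
  obtain ⟨j, hj⟩ := reach k z hz0 hzn hk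
  have hr' : pIsRoot p' (piter p' j z) := by
    rw [hj]
    exact hroots' _ (proot_range hg hz0 hzn).1 (proot_range hg hz0 hzn).2
      (proot_isRoot hg hz0 hzn)
  have hr'' : pIsRoot p' (piter p' p'.length z) := proot_isRoot hgood' hz0 hzn
  have := iter_root_unique hr' hr''
  rw [proot, ← this, hj]

-- Case 2 (link): set root ry to root rx (rx ≠ ry); classes of ry are re-rooted to rx.
lemma set_link {n : Int} {p : List Int} (hg : GoodP n p)
    {ry rx : Int} (hy0 : 0 ≤ ry) (hyn : ry < n) (hx0 : 0 ≤ rx) (hxn : rx < n)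
    (hyr : pIsRoot p ry) (hxr : pIsRoot p rx) (hne : rx ≠ ry) :
    GoodP n (p.set ry.toNat rx) ∧
    ∀ z, 0 ≤ z → z < n →
      proot (p.set ry.toNat rx) z = if proot p z = ry then rx else proot p z := by
  have hlen := hg.1
  have he := hg.2.1
  set p' := p.set ry.toNat rx with hp'
  have hlen' : p'.length = n.toNat := by simp [hp', hlen]
  have he' : ∀ e ∈ p', 0 ≤ e ∧ e < n := by
    intro e hmem
    rcases mem_set_cases hmem with h | h
    · subst h; exact ⟨hx0, hxn⟩
    · exact he _ h
  have hstep' : ∀ z, 0 ≤ z → z < n → pstep p' z = if z = ry then rx else pstep p z :=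
    fun z hz0 hzn => pstep_set hlen hy0 hyn rx hz0 hzn
  -- target root function
  set T : Int → Int := fun z => if proot p z = ry then rx else proot p z with hT
  have hTroot : ∀ z, 0 ≤ z → z < n → pIsRoot p' (T z) := by
    intro z hz0 hzn
    by_cases hc : proot p z = ry
    · have hTz : T z = rx := by simp [hT, hc]
      rw [hTz, pIsRoot, hstep' rx hx0 hxn, if_neg hne]
      exact hxr
    · have hTz : T z = proot p z := by simp [hT, hc]
      rw [hTz, pIsRoot, hstep' _ (proot_range hg hz0 hzn).1 (proot_range hg hz0 hzn).2,
        if_neg hc]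
      exact proot_isRoot hg hz0 hzn
  have reach : ∀ k z, 0 ≤ z → z < n → pIsRoot p (piter p k z) →
      ∃ j, piter p' j z = T z := by
    intro k
    induction k with
    | zero =>
      intro z hz0 hzn hr
      by_cases hzy : z = ry
      · subst hzy
        refine ⟨1, ?_⟩
        have h1 : piter p' 1 z = pstep p' z := rfl
        rw [h1, hstep' z hz0 hzn]
        simp [hT, proot_of_isRoot hyr]
      · refine ⟨0, ?_⟩
        have h0 : piter p' 0 z = z := rfl
        rw [h0, hT]
        have hrz : pIsRoot p z := hr
        simp [proot_of_isRoot hrz, hzy]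
    | succ k ih =>
      intro z hz0 hzn hr
      by_cases hzy : z = ry
      · subst hzy
        refine ⟨1, ?_⟩
        have h1 : piter p' 1 z = pstep p' z := rfl
        rw [h1, hstep' _ hz0 hzn]
        simp [hT, proot_of_isRoot hyr]
      · by_cases hrz : pIsRoot p z
        · refine ⟨0, ?_⟩
          have h0 : piter p' 0 z = z := rfl
          rw [h0, hT]
          simp [proot_of_isRoot hrz, hzy]
        · have hsr := pstep_range hlen he hz0 hzn
          have hnext : pIsRoot p (piter p k (pstep p z)) := by
            rw [← piter_succ]; exact hr
          obtain ⟨j, hj⟩ := ih (pstep p z) hsr.1 hsr.2 hnext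
          refine ⟨j + 1, ?_⟩
          rw [piter_succ, hstep' z hz0 hzn]
          simp only [if_neg hzy]
          rw [hj]
          simp [hT, proot_step hg hz0 hzn]
  have hgood' : GoodP n p' := by
    refine ⟨hlen', he', ?_⟩
    intro z hz0 hzn
    obtain ⟨k, _, hk⟩ := reach_lt hg hz0 hzn
    obtain ⟨j, hj⟩ := reach k z hz0 hzn hk
    exact ⟨j, by rw [hj]; exact hTroot z hz0 hzn⟩
  refine ⟨hgood', ?_⟩
  intro z hz0 hzn
  obtain ⟨k, _, hk⟩ := reach_lt hg hz0 hzn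
  obtain ⟨j, hj⟩ := reach k z hz0 hzn hk
  have hr' : pIsRoot p' (piter p' j z) := by rw [hj]; exact hTroot z hz0 hzn
  have hr'' : pIsRoot p' (piter p' p'.length z) := proot_isRoot hgood' hz0 hzn
  have := iter_root_unique hr' hr''
  rw [proot, ← this, hj]

-- find (with fuel = length+1 available) returns the root and only compresses:
-- the array stays Good, roots are pointwise unchanged.
lemma pvFind_spec {n : Int} : ∀ (fuel : Nat) (p : List Int) (x : Int), GoodP n p →
    0 ≤ x → x < n → (∃ k < fuel, pIsRoot p (piter p k x)) →
    (pvFind fuel p x).2 = proot p x ∧ GoodP n (pvFind fuel p x).1 ∧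
    ∀ z, 0 ≤ z → z < n → proot (pvFind fuel p x).1 z = proot p z := by
  intro fuel
  induction fuel with
  | zero =>
    intro p x _ _ _ hk
    obtain ⟨k, hk, _⟩ := hk
    omega
  | succ fuel ih =>
    intro p x hg hx0 hxn hk
    by_cases hroot : pstep p x = x
    · have : pvFind (fuel + 1) p x = (p, x) := by
        simp [pvFind, pstep] at hroot ⊢
        intro h
        exact absurd hroot h
      rw [this]
      exact ⟨(proot_of_isRoot hroot).symm, hg, fun z _ _ => rfl⟩
    · have hpx := pstep_range hg.1 hg.2.1 hx0 hxn
      have hk' : ∃ k < fuel, pIsRoot p (piter p k (pstep p x)) := by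
        obtain ⟨k, hklt, hkr⟩ := hk
        match k with
        | 0 => exact absurd hkr hroot
        | k + 1 =>
          rw [piter_succ] at hkr
          exact ⟨k, by omega, hkr⟩
      obtain ⟨hr2, hrgood, hrpres⟩ := ih p (pstep p x) hg hpx.1 hpx.2 hk'
      have hunfold : pvFind (fuel + 1) p x =
          (PySem.List.pySetD (pvFind fuel p (pstep p x)).1 x (pvFind fuel p (pstep p x)).2,
           (pvFind fuel p (pstep p x)).2) := by
        simp only [pvFind, pstep]
        rw [if_pos]
        exact fun h => hroot (by simpa [pstep] using h)
      set r := pvFind fuel p (pstep p x) with hr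
      have hrootval : r.2 = proot p x := by rw [hr2, proot_step hg hx0 hxn]
      have hsetD : PySem.List.pySetD r.1 x r.2 = r.1.set x.toNat r.2 := by
        rw [PySem.List.pySetD_of_nonneg _ _ hx0]
      have hvcomp : r.2 = proot r.1 x := by rw [hrootval, ← hrpres x hx0 hxn]
      obtain ⟨hgood3, hpres3⟩ := set_compress hrgood hx0 hxn
      rw [hunfold]
      refine ⟨hrootval, ?_, ?_⟩
      · show GoodP n (PySem.List.pySetD r.1 x r.2)
        rw [hsetD, hvcomp]
        exact hgood3
      · intro z hz0 hzn
        show proot (PySem.List.pySetD r.1 x r.2) z = proot p z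
        rw [hsetD, hvcomp, hpres3 z hz0 hzn, hrpres z hz0 hzn]

-- Python negative-index wraparound for reads and writes, and small list/count facts.
lemma pyGetD_wrap (q : List Int) (x : Int) (d : Int) (h1 : -(q.length:Int) ≤ x) (h2 : x < 0) :
    PySem.List.pyGetD q x d = PySem.List.pyGetD q (x + q.length) d := by
  have hk : x = -(((-x).toNat : Nat) : Int) := by omega
  rw [hk, PySem.List.pyGetD_neg_natCast q (-x).toNat d (by omega) (by omega),
    PySem.List.pyGetD_eq_getElem q d (by omega) (by omega)]
  congr 1
  omega

lemma pySetD_wrap (q : List Int) (x v : Int) (h1 : -(q.length:Int) ≤ x) (h2 : x < 0) :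
    PySem.List.pySetD q x v = PySem.List.pySetD q (x + q.length) v := by
  have hidx : PySem.List.pyIdx? q.length x = some ((x + q.length).toNat) := by
    simp only [PySem.List.pyIdx?, if_neg (by omega : ¬ (0:Int) ≤ x),
      if_pos (show -((q.length:Nat):Int) ≤ x by omega)]
    congr 1
    omega
  have hidx2 : PySem.List.pyIdx? q.length (x + q.length) = some ((x + q.length).toNat) := by
    simp only [PySem.List.pyIdx?, if_pos (by omega : (0:Int) ≤ x + q.length),
      if_pos (by omega : x + (q.length:Int) < (q.length:Nat))]
  simp [PySem.List.pySetD, PySem.List.pySet?, hidx, hidx2]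

lemma list_set_self (l : List Int) (i : Nat) (v : Int) (h : i < l.length) (hv : l[i] = v) :
    l.set i v = l := by
  apply List.ext_getElem
  · simp
  · intro j hj hj2
    rw [List.getElem_set]
    split
    · next hij => subst hij; exact hv.symm
    · rfl

lemma lab_map (l : List Int) (f : Int → Int) (i : Int) (h0 : 0 ≤ i) (h1 : i < l.length) :
    PySem.List.pyGetD (l.map f) i 0 = f (PySem.List.pyGetD l i 0) := by
  rw [PySem.List.pyGetD_eq_getElem (l.map f) 0 (by omega) (by simpa using h1),
      PySem.List.pyGetD_eq_getElem l 0 (by omega) (by omega)]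
  simp

lemma lab_range (n x : Int) (h0 : 0 ≤ x) (h1 : x < n) :
    PySem.List.pyGetD (PySem.List.pyRange 0 n 1) x 0 = x := by
  rw [PySem.List.pyGetD_eq_getElem _ 0 (by omega)
    (by simp [PySem.List.length_pyRange_one]; omega)]
  rw [PySem.List.getElem_pyRange_one]
  omega

lemma lab_replicate (k : Nat) (c : Int) (i : Int) (h0 : 0 ≤ i) (h1 : i < k) :
    PySem.List.pyGetD (List.replicate k c) i 0 = c := by
  rw [PySem.List.pyGetD_eq_getElem _ 0 (by omega) (by simpa using h1)]
  simp

lemma count_map_swap (l : List Int) (a b : Int) (hab : a ≠ b) :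
    (((l.map (fun t => if t = b then a else t)).count a : Nat) : Int) = l.count a + l.count b := by
  induction l with
  | nil => simp
  | cons h t ih =>
    by_cases hb : h = b <;> by_cases ha : h = a <;>
      simp [List.count_cons, hb, ha, hab] <;> push_cast <;> omega

lemma count_map_other (l : List Int) (a b v : Int) (hva : v ≠ a) (hvb : v ≠ b) :
    (l.map (fun t => if t = b then a else t)).count v = l.count v := by
  induction l with
  | nil => simp
  | cons h t ih =>
    by_cases hb : h = b <;>
      simp [List.count_cons, hb, ih, hva, hvb, Ne.symm hva, Ne.symm hvb]

-- find on a wrapped (negative) index behaves as on the normalized index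
lemma pvFind_neg {n : Int} {p : List Int} (hg : GoodP n p) {x : Int}
    (h1 : -n ≤ x) (h2 : x < 0) :
    pvFind (p.length + 1) p x = pvFind (p.length + 1) p (x + n) := by
  have hlen := hg.1
  have he := hg.2.1
  have hn : 0 < n := by omega
  have hlenZ : (p.length : Int) = n := by rw [hlen]; omega
  have hx0 : 0 ≤ x + n := by omega
  have hxn : x + n < n := by omega
  have hget : PySem.List.pyGetD p x 0 = pstep p (x + n) := by
    rw [pyGetD_wrap p x 0 (by omega) h2, pstep, hlenZ]
  set px := pstep p (x + n) with hpx
  have hpxr : 0 ≤ px ∧ px < n := pstep_range hlen he hx0 hxn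
  have hnex : ¬ px = x := by omega
  have hlenpos : ∃ l', p.length = l' + 1 := ⟨p.length - 1, by omega⟩
  obtain ⟨l', hl'⟩ := hlenpos
  have hL : pvFind (p.length + 1) p x =
      (PySem.List.pySetD (pvFind p.length p px).1 x (pvFind p.length p px).2,
       (pvFind p.length p px).2) := by
    conv_lhs => rw [pvFind]
    rw [hget]
    rw [if_pos hnex]
  by_cases hroot : px = x + n
  · -- x+n is its own parent: both sides return (p, x+n)
    have hRoot : pIsRoot p (x + n) := by rw [pIsRoot, ← hpx, hroot]
    have hR : pvFind (p.length + 1) p (x + n) = (p, x + n) := by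
      conv_lhs => rw [pvFind]
      rw [show PySem.List.pyGetD p (x + n) 0 = px from rfl, hroot]
      simp
    have hInner : pvFind p.length p px = (p, x + n) := by
      rw [hl', pvFind]
      rw [show PySem.List.pyGetD p px 0 = pstep p px from rfl]
      rw [hroot]
      have : pstep p (x + n) = x + n := hRoot
      rw [this]
      simp
    rw [hL, hInner, hR]
    have hset : PySem.List.pySetD p x (x + n) = p := by
      rw [pySetD_wrap p x (x + n) (by omega) h2, hlenZ,
        PySem.List.pySetD_of_nonneg _ _ hx0]
      apply list_set_self
      have : pstep p (x + n) = p[(x + n).toNat]'(by omega) := by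
        rw [pstep, PySem.List.pyGetD_eq_getElem _ 0 (by omega) (by omega)]
      rw [← this, hRoot]
    rw [hset]
  · -- parent of x+n differs: both sides recurse on px and write back the root
    have hk' : ∃ k < p.length, pIsRoot p (piter p k px) := reach_lt hg hpxr.1 hpxr.2
    obtain ⟨hr2, hrgood, _⟩ := pvFind_spec p.length p px hg hpxr.1 hpxr.2 hk'
    have hlen1 : ((pvFind p.length p px).1.length : Int) = n := by
      rw [hrgood.1]; omega
    have hR : pvFind (p.length + 1) p (x + n) =
        (PySem.List.pySetD (pvFind p.length p px).1 (x + n) (pvFind p.length p px).2,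
         (pvFind p.length p px).2) := by
      conv_lhs => rw [pvFind]
      rw [show PySem.List.pyGetD p (x + n) 0 = px from rfl]
      rw [if_pos hroot]
    rw [hL, hR]
    rw [pySetD_wrap (pvFind p.length p px).1 x (pvFind p.length p px).2 (by omega) h2,
      hlen1]

-- find wrapper handling a possibly-negative index
lemma pvFind_full {n : Int} {p : List Int} (hg : GoodP n p) {x : Int}
    (h1 : -n ≤ x) (h2 : x < n) :
    (pvFind (p.length + 1) p x).2 = proot p (if x < 0 then x + n else x) ∧
    GoodP n (pvFind (p.length + 1) p x).1 ∧
    ∀ z, 0 ≤ z → z < n → proot (pvFind (p.length + 1) p x).1 z = proot p z := by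
  by_cases hneg : x < 0
  · rw [if_pos hneg, pvFind_neg hg h1 hneg]
    have hx0 : 0 ≤ x + n := by omega
    have hxn : x + n < n := by omega
    obtain ⟨k, hk, hr⟩ := reach_lt hg hx0 hxn
    exact pvFind_spec (p.length + 1) p (x + n) hg hx0 hxn ⟨k, by omega, hr⟩
  · rw [if_neg hneg]
    have hx0 : 0 ≤ x := by omega
    obtain ⟨k, hk, hr⟩ := reach_lt hg hx0 h2
    exact pvFind_spec (p.length + 1) p x hg hx0 h2 ⟨k, by omega, hr⟩

lemma lab_norm {n : Int} (label : List Int) (hlabZ : (label.length : Int) = n)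
    {x : Int} (h1 : -n ≤ x) (h2 : x < n) :
    PySem.List.pyGetD label x 0 = PySem.List.pyGetD label (if x < 0 then x + n else x) 0 := by
  by_cases hneg : x < 0
  · rw [if_pos hneg, pyGetD_wrap label x 0 (by omega) hneg, hlabZ]
  · rw [if_neg hneg]

-- One union step of A matches one label-rewrite step of B.
lemma pvUnionA_spec {n : Int} {parent size label rank : List Int} {maxsz cur : Int}
    (hInv : InvP n parent size label) (hrank : rank = List.replicate n.toNat 0)
    (hm : maxsz = cur) {x y : Int}
    (hx1 : -n ≤ x) (hx2 : x < n) (hy1 : -n ≤ y) (hy2 : y < n) :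
    (pvUnionA (parent, rank, size, maxsz) x y).2.1 = rank ∧
    (PySem.List.pyGetD label x 0 ≠ PySem.List.pyGetD label y 0 →
       InvP n (pvUnionA (parent, rank, size, maxsz) x y).1
         (pvUnionA (parent, rank, size, maxsz) x y).2.2.1
         (label.map (fun t => if t = PySem.List.pyGetD label y 0
            then PySem.List.pyGetD label x 0 else t)) ∧
       (pvUnionA (parent, rank, size, maxsz) x y).2.2.2 =
         max cur (((label.map (fun t => if t = PySem.List.pyGetD label y 0
            then PySem.List.pyGetD label x 0 else t)).count
              (PySem.List.pyGetD label x 0) : Nat) : Int)) ∧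
    (PySem.List.pyGetD label x 0 = PySem.List.pyGetD label y 0 →
       InvP n (pvUnionA (parent, rank, size, maxsz) x y).1
         (pvUnionA (parent, rank, size, maxsz) x y).2.2.1 label ∧
       (pvUnionA (parent, rank, size, maxsz) x y).2.2.2 = cur) := by
  obtain ⟨hg, hlabLen, hsizeLen, hiff, hcount⟩ := hInv
  have hn : 0 < n := by omega
  have hlabZ : (label.length : Int) = n := by rw [hlabLen]; omega
  set nx := if x < 0 then x + n else x with hnxd
  set ny := if y < 0 then y + n else y with hnyd
  have hnxr : 0 ≤ nx ∧ nx < n := by rw [hnxd]; split <;> omega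
  have hnyr : 0 ≤ ny ∧ ny < n := by rw [hnyd]; split <;> omega
  obtain ⟨h1v, h1g, h1p⟩ := pvFind_full hg hx1 hx2
  set p1 := (pvFind (parent.length + 1) parent x).1 with hp1d
  obtain ⟨h2v, h2g, h2p'⟩ := pvFind_full h1g hy1 hy2 (x := y)
  set p2 := (pvFind (p1.length + 1) p1 y).1 with hp2d
  have h2p : ∀ z, 0 ≤ z → z < n → proot p2 z = proot parent z := by
    intro z hz0 hzn
    rw [h2p' z hz0 hzn, h1p z hz0 hzn]
  set rx := proot parent nx with hrxd
  set ry := proot parent ny with hryd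
  have hrxv : (pvFind (parent.length + 1) parent x).2 = rx := by
    rw [h1v]
  have hryv : (pvFind (p1.length + 1) p1 y).2 = ry := by
    rw [h2v, h1p ny hnyr.1 hnyr.2]
  have hrxr : 0 ≤ rx ∧ rx < n := by rw [hrxd]; exact proot_range hg hnxr.1 hnxr.2
  have hryr : 0 ≤ ry ∧ ry < n := by rw [hryd]; exact proot_range hg hnyr.1 hnyr.2
  set a := PySem.List.pyGetD label x 0 with had
  set b := PySem.List.pyGetD label y 0 with hbd
  have ha : a = PySem.List.pyGetD label nx 0 := by
    rw [had, lab_norm label hlabZ hx1 hx2]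
  have hb : b = PySem.List.pyGetD label ny 0 := by
    rw [hbd, lab_norm label hlabZ hy1 hy2]
  have hiffab : rx = ry ↔ a = b := by
    rw [hrxd, hryd, ha, hb]
    exact hiff nx ny hnxr.1 hnxr.2 hnyr.1 hnyr.2
  have hRa : ∀ i, 0 ≤ i → i < n →
      (proot parent i = rx ↔ PySem.List.pyGetD label i 0 = a) := by
    intro i h0 h1
    rw [hrxd, ha]
    exact hiff i nx h0 h1 hnxr.1 hnxr.2
  have hRb : ∀ i, 0 ≤ i → i < n →
      (proot parent i = ry ↔ PySem.List.pyGetD label i 0 = b) := by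
    intro i h0 h1
    rw [hryd, hb]
    exact hiff i ny h0 h1 hnyr.1 hnyr.2
  have hrank0 : PySem.List.pyGetD rank rx 0 = 0 := by
    rw [hrank]; exact lab_replicate n.toNat 0 rx hrxr.1 (by omega)
  have hrank0' : PySem.List.pyGetD rank ry 0 = 0 := by
    rw [hrank]; exact lab_replicate n.toNat 0 ry hryr.1 (by omega)
  have hUn : pvUnionA (parent, rank, size, maxsz) x y =
      if rx = ry then (p2, rank, size, maxsz)
      else (PySem.List.pySetD p2 ry rx, rank,
            PySem.List.pySetD size rx
              (PySem.List.pyGetD size rx 0 + PySem.List.pyGetD size ry 0),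
            max maxsz (PySem.List.pyGetD (PySem.List.pySetD size rx
              (PySem.List.pyGetD size rx 0 + PySem.List.pyGetD size ry 0)) rx 0)) := by
    simp only [pvUnionA]
    rw [← hp1d, hrxv, hryv, ← hp2d, hrank0, hrank0']
    rw [if_neg (lt_irrefl (0 : Int))]
  by_cases hab : a = b
  · have hrxy : rx = ry := hiffab.mpr hab
    rw [hUn, if_pos hrxy]
    refine ⟨rfl, fun hne => absurd hab hne, fun _ => ⟨?_, hm⟩⟩
    exact ⟨h2g, hlabLen, hsizeLen,
      (fun i j h0 h1 h2 h3 => by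
        rw [h2p i h0 h1, h2p j h2 h3]; exact hiff i j h0 h1 h2 h3),
      (fun i h0 h1 => by rw [h2p i h0 h1]; exact hcount i h0 h1)⟩
  · have hrxy : ¬ rx = ry := fun h => hab (hiffab.mp h)
    rw [hUn, if_neg hrxy]
    refine ⟨rfl, fun _ => ?_, fun heq => absurd heq hab⟩
    set w := PySem.List.pyGetD size rx 0 + PySem.List.pyGetD size ry 0 with hwd
    set size' := PySem.List.pySetD size rx w with hs'd
    have hs'set : size' = size.set rx.toNat w := by
      rw [hs'd]; exact PySem.List.pySetD_of_nonneg _ _ hrxr.1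
    have hsget : ∀ t, 0 ≤ t → t < n →
        PySem.List.pyGetD size' t 0 = if t = rx then w else PySem.List.pyGetD size t 0 := by
      intro t h0 h1
      rw [hs'set]
      exact pstep_set hsizeLen hrxr.1 hrxr.2 w h0 h1
    have hryroot2 : pIsRoot p2 ry := by
      have h : proot p2 ny = ry := by rw [h2p ny hnyr.1 hnyr.2, hryd]
      rw [← h]
      exact proot_isRoot h2g hnyr.1 hnyr.2
    have hrxroot2 : pIsRoot p2 rx := by
      have h : proot p2 nx = rx := by rw [h2p nx hnxr.1 hnxr.2, hrxd]
      rw [← h]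
      exact proot_isRoot h2g hnxr.1 hnxr.2
    obtain ⟨h3g, h3p⟩ := set_link h2g hryr.1 hryr.2 hrxr.1 hrxr.2 hryroot2 hrxroot2 hrxy
    have hset3 : PySem.List.pySetD p2 ry rx = p2.set ry.toNat rx :=
      PySem.List.pySetD_of_nonneg _ _ hryr.1
    have hroots3 : ∀ z, 0 ≤ z → z < n →
        proot (PySem.List.pySetD p2 ry rx) z =
          if proot parent z = ry then rx else proot parent z := by
      intro z h0 h1
      rw [hset3, h3p z h0 h1, h2p z h0 h1]
    have hsa : PySem.List.pyGetD size rx 0 = (label.count a : Int) := by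
      have h := hcount nx hnxr.1 hnxr.2
      rw [← hrxd] at h
      rw [h, ← ha]
    have hsb : PySem.List.pyGetD size ry 0 = (label.count b : Int) := by
      have h := hcount ny hnyr.1 hnyr.2
      rw [← hryd] at h
      rw [h, ← hb]
    have hwcount : w =
        (((label.map (fun t => if t = b then a else t)).count a : Nat) : Int) := by
      rw [hwd, hsa, hsb, count_map_swap label a b hab]
    constructor
    · -- the invariant for the merged state
      show InvP n (PySem.List.pySetD p2 ry rx) size'
        (label.map (fun t => if t = b then a else t))
      have hgood3 : GoodP n (PySem.List.pySetD p2 ry rx) := by rw [hset3]; exact h3g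
      refine ⟨hgood3, by simp [hlabLen], by rw [hs'set]; simp [hsizeLen], ?_, ?_⟩
      · intro i j h0 h1 h2 h3
        rw [lab_map label _ i h0 (by omega), lab_map label _ j h2 (by omega),
          hroots3 i h0 h1, hroots3 j h2 h3]
        by_cases hib : PySem.List.pyGetD label i 0 = b
        · rw [if_pos ((hRb i h0 h1).mpr hib), if_pos hib]
          by_cases hjb : PySem.List.pyGetD label j 0 = b
          · rw [if_pos ((hRb j h2 h3).mpr hjb), if_pos hjb]
            simp
          · rw [if_neg (fun h => hjb ((hRb j h2 h3).mp h)), if_neg hjb]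
            constructor
            · intro h; exact ((hRa j h2 h3).mp h.symm).symm
            · intro h; exact ((hRa j h2 h3).mpr h.symm).symm
        · rw [if_neg (fun h => hib ((hRb i h0 h1).mp h)), if_neg hib]
          by_cases hjb : PySem.List.pyGetD label j 0 = b
          · rw [if_pos ((hRb j h2 h3).mpr hjb), if_pos hjb]
            constructor
            · intro h; exact (hRa i h0 h1).mp h
            · intro h; exact (hRa i h0 h1).mpr h
          · rw [if_neg (fun h => hjb ((hRb j h2 h3).mp h)), if_neg hjb]
            exact hiff i j h0 h1 h2 h3
      · intro i h0 h1
        rw [lab_map label _ i h0 (by omega), hroots3 i h0 h1]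
        by_cases hib : PySem.List.pyGetD label i 0 = b
        · rw [if_pos ((hRb i h0 h1).mpr hib), if_pos hib,
            hsget rx hrxr.1 hrxr.2, if_pos rfl]
          exact hwcount
        · by_cases hia : PySem.List.pyGetD label i 0 = a
          · have hRi : proot parent i = rx := (hRa i h0 h1).mpr hia
            rw [if_neg (by rw [hRi]; exact hrxy), if_neg hib, hRi,
              hsget rx hrxr.1 hrxr.2, if_pos rfl, hia]
            exact hwcount
          · rw [if_neg (fun h => hib ((hRb i h0 h1).mp h)), if_neg hib,
              hsget (proot parent i) (proot_range hg h0 h1).1 (proot_range hg h0 h1).2,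
              if_neg (fun h => hia ((hRa i h0 h1).mp h)),
              hcount i h0 h1,
              count_map_other label a b _ hia hib]
    · -- the running maximum
      show max maxsz (PySem.List.pyGetD size' rx 0) = _
      rw [hsget rx hrxr.1 hrxr.2, if_pos rfl, hm, hwcount]

-- the two loop bodies, named (definitionally equal to the lambdas in the ports)
def stepA (acc : (List Int × List Int × List Int × Int) × List Int) (q : Int × Int) :
    (List Int × List Int × List Int × Int) × List Int :=
  let st := pvUnionA acc.1 (q.1 - 1) (q.2 - 1)
  (st, acc.2 ++ [st.2.2.2])

def stepB (st : List Int × Int × List Int) (q : Int × Int) : List Int × Int × List Int :=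
  let a := PySem.List.pyGetD st.1 (q.1 - 1) 0
  let b := PySem.List.pyGetD st.1 (q.2 - 1) 0
  if a ≠ b then
    let label' := st.1.map (fun x => if x = b then a else x)
    let cur' := max st.2.1 ((label'.count a : Nat) : Int)
    (label', cur', st.2.2 ++ [cur'])
  else (st.1, st.2.1, st.2.2 ++ [st.2.1])

lemma loop_spec {n : Int} : ∀ (qs : List (Int × Int)) (parent rank size label : List Int)
    (maxsz cur : Int) (res : List Int),
    InvP n parent size label → rank = List.replicate n.toNat 0 → maxsz = cur →
    (∀ q ∈ qs, (-n ≤ q.1 - 1 ∧ q.1 - 1 < n) ∧ (-n ≤ q.2 - 1 ∧ q.2 - 1 < n)) →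
    (qs.foldl stepA ((parent, rank, size, maxsz), res)).2
      = (qs.foldl stepB (label, cur, res)).2.2 := by
  intro qs
  induction qs with
  | nil =>
    intro parent rank size label maxsz cur res _ _ _ _
    rfl
  | cons q qs ih =>
    intro parent rank size label maxsz cur res hInv hrank hm hq
    have hqh := hq q (by simp)
    have hqt : ∀ r ∈ qs, (-n ≤ r.1 - 1 ∧ r.1 - 1 < n) ∧ (-n ≤ r.2 - 1 ∧ r.2 - 1 < n) :=
      fun r hr => hq r (List.mem_cons_of_mem _ hr)
    obtain ⟨hA, hB, hC⟩ := pvUnionA_spec hInv hrank hm hqh.1.1 hqh.1.2 hqh.2.1 hqh.2.2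
    rw [List.foldl_cons, List.foldl_cons]
    have hAstep : stepA ((parent, rank, size, maxsz), res) q =
        (pvUnionA (parent, rank, size, maxsz) (q.1 - 1) (q.2 - 1),
         res ++ [(pvUnionA (parent, rank, size, maxsz) (q.1 - 1) (q.2 - 1)).2.2.2]) := rfl
    rw [hAstep]
    set u := pvUnionA (parent, rank, size, maxsz) (q.1 - 1) (q.2 - 1) with hud
    by_cases hab : PySem.List.pyGetD label (q.1 - 1) 0 = PySem.List.pyGetD label (q.2 - 1) 0
    · obtain ⟨hI, hM⟩ := hC hab
      have hBstep : stepB (label, cur, res) q = (label, cur, res ++ [cur]) := by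
        simp only [stepB]
        rw [if_neg (not_not_intro hab)]
      rw [hBstep, hM]
      exact ih u.1 u.2.1 u.2.2.1 label u.2.2.2 cur (res ++ [cur]) hI (hA.trans hrank) hM hqt
    · obtain ⟨hI, hM⟩ := hB hab
      have hBstep : stepB (label, cur, res) q =
          (label.map (fun t => if t = PySem.List.pyGetD label (q.2 - 1) 0
             then PySem.List.pyGetD label (q.1 - 1) 0 else t),
           max cur (((label.map (fun t => if t = PySem.List.pyGetD label (q.2 - 1) 0
             then PySem.List.pyGetD label (q.1 - 1) 0 else t)).count
               (PySem.List.pyGetD label (q.1 - 1) 0) : Nat) : Int),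
           res ++ [max cur (((label.map (fun t => if t = PySem.List.pyGetD label (q.2 - 1) 0
             then PySem.List.pyGetD label (q.1 - 1) 0 else t)).count
               (PySem.List.pyGetD label (q.1 - 1) 0) : Nat) : Int)]) := by
        simp only [stepB]
        rw [if_pos hab]
      rw [hBstep, hM]
      exact ih u.1 u.2.1 u.2.2.1 _ u.2.2.2 _ _ hI (hA.trans hrank) hM hqt

-- ===== VERDICT (by name: the statement is the Claim_ definition above) =====
theorem merge_tables_spec : Claim_equal_merge_tables := by
  unfold Claim_equal_merge_tables
  intro n m rows queries _hdom hpre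
  obtain ⟨hn, hq⟩ := hpre
  unfold Spec_merge_tables
  -- initial state facts
  have hstep0 : ∀ x : Int, 0 ≤ x → x < n → pstep (PySem.List.pyRange 0 n 1) x = x :=
    fun x h0 h1 => lab_range n x h0 h1
  have hg0 : GoodP n (PySem.List.pyRange 0 n 1) := by
    refine ⟨by simp [PySem.List.length_pyRange_one], ?_, ?_⟩
    · intro e he
      exact PySem.List.mem_pyRange_one.mp he
    · intro x h0 h1
      exact ⟨0, hstep0 x h0 h1⟩
  have hroot0 : ∀ x : Int, 0 ≤ x → x < n → proot (PySem.List.pyRange 0 n 1) x = x :=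
    fun x h0 h1 => proot_of_isRoot (hstep0 x h0 h1)
  have hInv0 : InvP n (PySem.List.pyRange 0 n 1) (List.replicate n.toNat 1)
      (PySem.List.pyRange 0 n 1) := by
    refine ⟨hg0, by simp [PySem.List.length_pyRange_one], by simp, ?_, ?_⟩
    · intro i j h0 h1 h2 h3
      rw [hroot0 i h0 h1, hroot0 j h2 h3, lab_range n i h0 h1, lab_range n j h2 h3]
    · intro i h0 h1
      rw [hroot0 i h0 h1, lab_replicate n.toNat 1 i h0 (by omega), lab_range n i h0 h1,
        List.count_eq_one_of_mem (PySem.List.nodup_pyRange_one 0 n)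
          (PySem.List.mem_pyRange_one.mpr ⟨h0, h1⟩)]
      simp
  have hmax0 : (PySem.List.max? (List.replicate n.toNat (1 : Int)) (fun v => v)).getD 0 = 1 := by
    obtain ⟨m', hm'⟩ : ∃ m', n.toNat = m' + 1 := ⟨n.toNat - 1, by omega⟩
    rw [hm', List.replicate_succ, PySem.List.max?_id_cons]
    have hfold : ∀ k, (List.replicate k (1:Int)).foldl max 1 = 1 := by
      intro k; induction k with
      | zero => rfl
      | succ k ih => simp [List.replicate_succ, ih]
    simp [hfold]
  show merge_tables n m rows queries = merge_tables_alt n m rows queries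
  have hA : merge_tables n m rows queries =
      (queries.foldl stepA ((PySem.List.pyRange 0 n 1, List.replicate n.toNat 0,
        List.replicate n.toNat 1,
        (PySem.List.max? (List.replicate n.toNat (1 : Int)) (fun v => v)).getD 0),
        ([] : List Int))).2 := rfl
  have hB : merge_tables_alt n m rows queries =
      (queries.foldl stepB (PySem.List.pyRange 0 n 1, (1 : Int), ([] : List Int))).2.2 := rfl
  rw [hA, hB]
  exact loop_spec queries _ _ _ _ _ _ [] hInv0 rfl hmax0 hq
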